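-- pv_equiv track=rewrite | github.com/funkydonkey/stunning-enigma | app/utils.py | _has_balanced_parentheses
-- ===== SOURCE A (Python) =====
-- def _has_balanced_parentheses(formula: str) -> bool:
--     """
--     Check if parentheses are balanced in the formula.
--
--     Args:
--         formula: Formula to check
--
--     Returns:
--         True if balanced, False otherwise
--     """
--     depth = 0
--     in_string = False
--     string_char = None
--
--     for i, char in enumerate(formula):
--         # Handle string literals
--         if char in ('"', "'") and (i == 0 or formula[i-1] != '\\'):
--             if not in_string:
--                 in_string = True
--                 string_char = char
--             elif char == string_char:
--                 in_string = False
--                 string_char = None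
--
--         # Track parenthesis depth (only outside strings)
--         if not in_string:
--             if char == '(':
--                 depth += 1
--             elif char == ')':
--                 depth -= 1
--                 # If we go negative, we have a closing paren without opening
--                 if depth < 0:
--                     return False
--
--     # Must end at depth 0
--     return depth == 0
-- ===== SOURCE B (Python) =====
-- def _has_balanced_parentheses(formula: str) -> bool:
--     # Pass 1: strip string literals, keeping only the parens outside strings.
--     parens = []
--     in_string = False
--     string_char = None
--     for i, char in enumerate(formula):
--         if char in ('"', "'") and (i == 0 or formula[i-1] != '\\'):
--             if not in_string:
--                 in_string = True
--                 string_char = char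
--             elif char == string_char:
--                 in_string = False
--                 string_char = None
--         if not in_string and char in ('(', ')'):
--             parens.append(char)
--     # Pass 2: check balance of the filtered paren sequence.
--     depth = 0
--     for char in parens:
--         if char == '(':
--             depth += 1
--         else:
--             depth -= 1
--             if depth < 0:
--                 return False
--     return depth == 0
-- ===== Notes on version B (the rewrite author's own statement) =====
-- stated objective: alternative
-- what changed: Split A's fused single scan into two separate passes: one pass tracks only string-literal state and extracts the parentheses occurring outside strings, a second independent pass checks balance of that filtered sequence.
import Mathlib
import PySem

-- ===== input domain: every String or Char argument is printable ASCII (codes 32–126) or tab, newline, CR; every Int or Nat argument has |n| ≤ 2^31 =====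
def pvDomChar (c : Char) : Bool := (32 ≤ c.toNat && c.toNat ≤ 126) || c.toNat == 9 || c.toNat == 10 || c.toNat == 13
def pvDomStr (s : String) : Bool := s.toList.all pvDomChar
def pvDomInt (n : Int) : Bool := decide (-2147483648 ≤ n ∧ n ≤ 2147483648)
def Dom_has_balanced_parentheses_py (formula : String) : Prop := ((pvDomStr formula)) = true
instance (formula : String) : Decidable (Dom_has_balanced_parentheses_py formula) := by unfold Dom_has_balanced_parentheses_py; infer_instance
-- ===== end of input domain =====

-- B splits A's fused scan into two passes: strip string literals first, then check paren balance; alternative decomposition, same O(n) cost.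


-- ===== PORT A =====
-- the value `formula[i-1]` in A's escape test is exactly the previous character,
-- carried here as `prev` (prev = none ⟺ i == 0); this is exact on every input.
def aToggle (c : Char) (prev : Option Char) (ins : Bool) (sc : Option Char) :
    Bool × Option Char :=
  if (c = '"' ∨ c = '\'') ∧ (prev = none ∨ prev ≠ some '\\') then
    if !ins then (true, some c)
    else if sc = some c then (false, none)
    else (ins, sc)
  else (ins, sc)

-- A's fused loop: string-literal state and depth together, early `return False`.
def aLoop : List Char → Option Char → Int → Bool → Option Char → Bool
  | [], _, depth, _, _ => depth == 0
  | c :: rest, prev, depth, ins, sc =>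
    let p := aToggle c prev ins sc
    if !p.1 then
      if c = '(' then aLoop rest (some c) (depth + 1) p.1 p.2
      else if c = ')' then
        if depth - 1 < 0 then false
        else aLoop rest (some c) (depth - 1) p.1 p.2
      else aLoop rest (some c) depth p.1 p.2
    else aLoop rest (some c) depth p.1 p.2

def has_balanced_parentheses_py (formula : String) : Bool :=
  aLoop formula.toList none 0 false none

-- ===== PORT B =====
-- B pass 1: strip string literals, keep only parens outside strings (same
-- toggle rule, same `prev` stand-in for formula[i-1]).
def stripStrings : List Char → Option Char → Bool → Option Char → List Char
  | [], _, _, _ => []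
  | c :: rest, prev, ins, sc =>
    let p := aToggle c prev ins sc
    let tail := stripStrings rest (some c) p.1 p.2
    if !p.1 ∧ (c = '(' ∨ c = ')') then c :: tail else tail

-- B pass 2: balance check of the filtered paren sequence.
def checkDepth : List Char → Int → Bool
  | [], depth => depth == 0
  | c :: rest, depth =>
    if c = '(' then checkDepth rest (depth + 1)
    else if depth - 1 < 0 then false
    else checkDepth rest (depth - 1)

def has_balanced_parentheses_py_alt (formula : String) : Bool :=
  checkDepth (stripStrings formula.toList none false none) 0

-- ===== PRECONDITION & SPEC =====
def Spec_has_balanced_parentheses_py (formula : String) (out : Bool) : Prop := out = has_balanced_parentheses_py_alt formula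
instance (formula : String) (out : Bool) : Decidable (Spec_has_balanced_parentheses_py formula out) := by unfold Spec_has_balanced_parentheses_py; infer_instance

-- ===== CLAIM (what is proved, stated in full; the proofs are below) =====
def Claim_equal_has_balanced_parentheses_py : Prop := ∀ (formula : String), Dom_has_balanced_parentheses_py formula → Spec_has_balanced_parentheses_py formula (has_balanced_parentheses_py formula)

-- ===== LEMMAS AND PROOFS =====

lemma aLoop_eq_two_pass (chars : List Char) (prev : Option Char) (depth : Int)
    (ins : Bool) (sc : Option Char) :
    aLoop chars prev depth ins sc = checkDepth (stripStrings chars prev ins sc) depth := by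
  induction chars generalizing prev depth ins sc with
  | nil => rfl
  | cons c rest ih =>
    simp only [aLoop, stripStrings]
    set p := aToggle c prev ins sc with hp
    by_cases h1 : p.1
    · have hq : ¬ (!p.1 ∧ (c = '(' ∨ c = ')')) := by simp [h1]
      simp [h1, ih]
    · by_cases hl : c = '('
      · simp [h1, hl, checkDepth, ih]
      · by_cases hr : c = ')'
        · by_cases hd : depth - 1 < 0
          · simp [h1, hr, hd, checkDepth]
          · simp [h1, hr, hd, checkDepth, ih]
        · simp [h1, hl, hr, ih]

-- ===== VERDICT (by name: the statement is the Claim_ definition above) =====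
theorem has_balanced_parentheses_py_spec : Claim_equal_has_balanced_parentheses_py := by
  intro formula _
  unfold Spec_has_balanced_parentheses_py has_balanced_parentheses_py
    has_balanced_parentheses_py_alt
  exact aLoop_eq_two_pass formula.toList none 0 false none
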